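-- pv_equiv track=rewrite | github.com/dominicdesy/intelia-expert | rag/table_extractor/exporter.py | _sort_headers_logically
-- ===== SOURCE A (Python) =====
-- from typing import Dict, List, Any, Union
--
-- def _sort_headers_logically(headers: List[str]) -> List[str]:
--     """Trie les headers de manière logique pour faciliter la lecture"""
--
--     # Ordre de priorité
--     priority_prefixes = [
--         'genetic_line', 'sex', 'bird_type', 'phase_name',
--         'age_', 'amino_acid', 'nutrient', 'value_',
--         'weight_', 'fcr_', 'feed_', 'gain_'
--     ]
--
--     priority_headers = []
--     remaining_headers = []
--
--     for header in headers:
--         header_lower = header.lower()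
--         is_priority = False
--
--         for prefix in priority_prefixes:
--             if header_lower.startswith(prefix):
--                 priority_headers.append(header)
--                 is_priority = True
--                 break
--
--         if not is_priority:
--             remaining_headers.append(header)
--
--     # Trier chaque groupe
--     priority_headers.sort()
--     remaining_headers.sort()
--
--     return priority_headers + remaining_headers
-- ===== SOURCE B (Python) =====
-- def _sort_headers_logically(headers):
--     """Single stable keyed sort: priority-prefixed headers rank 0, others rank 1."""
--     priority_prefixes = [
--         'genetic_line', 'sex', 'bird_type', 'phase_name',
--         'age_', 'amino_acid', 'nutrient', 'value_',
--         'weight_', 'fcr_', 'feed_', 'gain_'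
--     ]
--
--     def key(header):
--         hl = header.lower()
--         rank = 0 if any(hl.startswith(p) for p in priority_prefixes) else 1
--         return (rank, header)
--
--     return sorted(headers, key=key)
-- ===== Notes on version B (the rewrite author's own statement) =====
-- stated objective: simpler
-- what changed: Replaces the explicit two-list partition loop plus two separate sorts with one stable sort keyed by (priority-rank, header).
import Mathlib
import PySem

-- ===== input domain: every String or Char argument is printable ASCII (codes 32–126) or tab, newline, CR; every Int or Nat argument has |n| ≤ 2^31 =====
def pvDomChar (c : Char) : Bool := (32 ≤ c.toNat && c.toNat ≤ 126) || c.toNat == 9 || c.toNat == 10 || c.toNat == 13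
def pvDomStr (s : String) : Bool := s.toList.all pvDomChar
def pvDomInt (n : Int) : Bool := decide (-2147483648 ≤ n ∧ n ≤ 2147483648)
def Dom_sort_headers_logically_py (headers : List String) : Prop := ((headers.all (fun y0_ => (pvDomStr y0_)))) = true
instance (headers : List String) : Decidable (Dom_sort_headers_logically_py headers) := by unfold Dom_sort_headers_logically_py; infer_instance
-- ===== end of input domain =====

-- B replaces A's explicit two-list partition + two sorts by one stable sort keyed by (priority-rank, header); objective: simpler.


-- ===== PORT A =====
def priorityPrefixesA : List String :=
  ["genetic_line", "sex", "bird_type", "phase_name",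
   "age_", "amino_acid", "nutrient", "value_",
   "weight_", "fcr_", "feed_", "gain_"]

-- inner 'for prefix … break' loop: first matching prefix decides
def pyIsPriorityA (headerLower : String) : List String → Bool
  | [] => false
  | p :: ps => if PySem.Str.startswith headerLower p then true else pyIsPriorityA headerLower ps

def sort_headers_logically_py (headers : List String) : List String :=
  let st := headers.foldl
    (fun (st : List String × List String) header =>
      let headerLower := PySem.Str.lower header
      if pyIsPriorityA headerLower priorityPrefixesA then (st.1 ++ [header], st.2)
      else (st.1, st.2 ++ [header]))
    ([], [])
  PySem.List.sorted st.1 (fun x => x) ++ PySem.List.sorted st.2 (fun x => x)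

-- ===== PORT B =====
def priorityPrefixesB : List String :=
  ["genetic_line", "sex", "bird_type", "phase_name",
   "age_", "amino_acid", "nutrient", "value_",
   "weight_", "fcr_", "feed_", "gain_"]

def rankB (header : String) : Int :=
  if priorityPrefixesB.any (fun p => PySem.Str.startswith (PySem.Str.lower header) p) then 0 else 1

def sort_headers_logically_py_alt (headers : List String) : List String :=
  PySem.List.sorted2 headers rankB (fun h => h)

-- ===== PRECONDITION & SPEC =====
def Spec_sort_headers_logically_py (headers : List String) (out : List String) : Prop := out = sort_headers_logically_py_alt headers
instance (headers : List String) (out : List String) : Decidable (Spec_sort_headers_logically_py headers out) := by unfold Spec_sort_headers_logically_py; infer_instance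

-- ===== CLAIM (what is proved, stated in full; the proofs are below) =====
def Claim_equal_sort_headers_logically_py : Prop := ∀ (headers : List String), Dom_sort_headers_logically_py headers → Spec_sort_headers_logically_py headers (sort_headers_logically_py headers)

-- ===== LEMMAS AND PROOFS =====

-- the full sort key B uses, as a lexicographic pair
def keyB (h : String) : Lex (Int × String) := toLex (rankB h, h)

theorem keyB_injective : Function.Injective keyB := by
  intro a b h
  have := congrArg (fun x => (ofLex x).2) h
  simpa [keyB] using this

theorem pyIsPriorityA_eq_any (hl : String) (ps : List String) :
    pyIsPriorityA hl ps = ps.any (fun p => PySem.Str.startswith hl p) := by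
  induction ps with
  | nil => rfl
  | cons p ps ih =>
    show (if PySem.Str.startswith hl p then true else pyIsPriorityA hl ps) = _
    rw [List.any_cons, ← ih]
    cases PySem.Str.startswith hl p <;> simp

theorem prefixes_eq : priorityPrefixesA = priorityPrefixesB := rfl

theorem rank_of_priority (h : String)
    (hp : pyIsPriorityA (PySem.Str.lower h) priorityPrefixesA = true) : rankB h = 0 := by
  rw [pyIsPriorityA_eq_any, prefixes_eq] at hp
  unfold rankB
  rw [hp]
  rfl

theorem rank_of_not_priority (h : String)
    (hp : pyIsPriorityA (PySem.Str.lower h) priorityPrefixesA = false) : rankB h = 1 := by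
  rw [pyIsPriorityA_eq_any, prefixes_eq] at hp
  unfold rankB
  rw [hp]
  rfl

-- A's partition loop characterised: it appends the filtered sublists to the accumulator
theorem partitionA_foldl (hs : List String) (acc : List String × List String) :
    hs.foldl
      (fun (st : List String × List String) header =>
        let headerLower := PySem.Str.lower header
        if pyIsPriorityA headerLower priorityPrefixesA then (st.1 ++ [header], st.2)
        else (st.1, st.2 ++ [header])) acc
    = (acc.1 ++ hs.filter (fun h => pyIsPriorityA (PySem.Str.lower h) priorityPrefixesA),
       acc.2 ++ hs.filter (fun h => !pyIsPriorityA (PySem.Str.lower h) priorityPrefixesA)) := by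
  induction hs generalizing acc with
  | nil => simp
  | cons h hs ih =>
    simp only [List.foldl_cons, List.filter_cons]
    by_cases hp : pyIsPriorityA (PySem.Str.lower h) priorityPrefixesA = true
    · simp [hp, ih]
    · simp only [Bool.not_eq_true] at hp
      simp [hp, ih]

-- B's sorted2 is a plain sort by the lexicographic key
theorem sorted2_eq_sorted_keyB (hs : List String) :
    PySem.List.sorted2 hs rankB (fun h => h) = PySem.List.sorted hs keyB := by
  rw [PySem.List.sorted_eq_foldl_insertBy]
  show List.foldl (fun acc x => PySem.List.insertBy _ x acc) [] hs = _
  have hbefore :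
      (fun a b : String => decide (rankB a < rankB b) || (!decide (rankB b < rankB a) && decide (a < b)))
      = fun a b : String => decide (keyB a < keyB b) := by
    funext a b
    rw [Bool.eq_iff_iff]
    simp only [Bool.or_eq_true, Bool.and_eq_true, Bool.not_eq_true', decide_eq_true_eq,
      decide_eq_false_iff_not]
    unfold keyB
    rw [Prod.Lex.toLex_lt_toLex]
    dsimp only
    constructor
    · rintro (h | ⟨h1, h2⟩)
      · exact Or.inl h
      · rcases lt_trichotomy (rankB a) (rankB b) with h' | h' | h'
        · exact Or.inl h'
        · exact Or.inr ⟨h', h2⟩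
        · exact absurd h' h1
    · rintro (h | ⟨h1, h2⟩)
      · exact Or.inl h
      · exact Or.inr ⟨by rw [h1]; exact lt_irrefl _, h2⟩
  rw [hbefore]
  simp

theorem main_eq (headers : List String) :
    sort_headers_logically_py headers = sort_headers_logically_py_alt headers := by
  unfold sort_headers_logically_py sort_headers_logically_py_alt
  rw [sorted2_eq_sorted_keyB, partitionA_foldl]
  simp only [List.nil_append]
  have hrank0 : ∀ x ∈ PySem.List.sorted
      (headers.filter (fun h => pyIsPriorityA (PySem.Str.lower h) priorityPrefixesA)) (fun x => x),
      rankB x = 0 := by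
    intro x hx
    have hm := (PySem.List.mem_sorted _ _ _ _).mp hx
    exact rank_of_priority x (List.mem_filter.mp hm).2
  have hrank1 : ∀ x ∈ PySem.List.sorted
      (headers.filter (fun h => !pyIsPriorityA (PySem.Str.lower h) priorityPrefixesA)) (fun x => x),
      rankB x = 1 := by
    intro x hx
    have hm := (PySem.List.mem_sorted _ _ _ _).mp hx
    have hf := (List.mem_filter.mp hm).2
    simp only [Bool.not_eq_true'] at hf
    exact rank_of_not_priority x hf
  apply PySem.List.eq_of_perm_of_pairwise_le_of_injective keyB keyB_injective
  · refine List.Perm.trans ?_ (PySem.List.sorted_perm headers keyB false).symm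
    refine List.Perm.trans
      (List.Perm.append (PySem.List.sorted_perm _ _ _) (PySem.List.sorted_perm _ _ _)) ?_
    exact List.filter_append_perm _ headers
  · rw [List.pairwise_append]
    refine ⟨?_, ?_, ?_⟩
    · refine (PySem.List.sorted_pairwise _ (fun x => x)).imp_of_mem ?_
      intro a b ha hb hle
      unfold keyB
      rw [Prod.Lex.toLex_le_toLex]
      dsimp only
      exact Or.inr ⟨by rw [hrank0 a ha, hrank0 b hb], hle⟩
    · refine (PySem.List.sorted_pairwise _ (fun x => x)).imp_of_mem ?_
      intro a b ha hb hle
      unfold keyB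
      rw [Prod.Lex.toLex_le_toLex]
      dsimp only
      exact Or.inr ⟨by rw [hrank1 a ha, hrank1 b hb], hle⟩
    · intro a ha b hb
      unfold keyB
      rw [Prod.Lex.toLex_le_toLex]
      dsimp only
      exact Or.inl (by rw [hrank0 a ha, hrank1 b hb]; norm_num)
  · exact PySem.List.sorted_pairwise headers keyB

-- ===== VERDICT (by name: the statement is the Claim_ definition above) =====
theorem sort_headers_logically_py_spec : Claim_equal_sort_headers_logically_py := by
  intro headers _
  unfold Spec_sort_headers_logically_py
  exact main_eq headers
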